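-- pv_equiv track=rewrite | github.com/sangeun99/algorithm | 프로그래머스/1/258712. 가장 많이 받은 선물/가장 많이 받은 선물.py | solution
-- ===== SOURCE A (Python) =====
-- def solution(friends, gifts):
--     # 이름을 인덱스로
--     f_dict = dict()
--     for i in range(len(friends)):
--         f_dict[friends[i]] = i
--
--     # 선물 기록
--     f_history = [[0 for _ in range(len(friends))] for _ in range(len(friends))]
--     for g in gifts:
--         g1, g2 = g.split()
--         f_history[f_dict[g1]][f_dict[g2]] += 1
--
--     # 선물 지수
--     f_rate = [0 for _ in range(len(friends))]
--     for i in range(len(friends)):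
--         f_give = sum(f_history[i])
--         f_get = 0
--         for j in range(len(f_history)):
--             f_get += f_history[j][i]
--         f_rate[i] = f_give - f_get
--
--     get = [0 for _ in range(len(friends))]
--
--     for i in range(len(friends)):
--         for j in range(len(friends)):
--             if f_history[i][j] > f_history[j][i]:
--                 get[i] += 1
--             elif f_history[i][j] == f_history[j][i] and f_rate[i] > f_rate[j]:
--                 get[i] += 1
--     answer = max(get)
--     return answer
-- ===== SOURCE B (Python) =====
-- def solution(friends, gifts):
--     n = len(friends)
--     idx = {name: k for k, name in enumerate(friends)}
--     pairs = []
--     for g in gifts: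
--         a, b = g.split()
--         pairs.append((idx[a], idx[b]))
--     givers = [p[0] for p in pairs]
--     receivers = [p[1] for p in pairs]
--     rate = [givers.count(k) - receivers.count(k) for k in range(n)]
--     winners = []
--     for i in range(n):
--         for j in range(i + 1, n):
--             cij = pairs.count((i, j))
--             cji = pairs.count((j, i))
--             if cij != cji:
--                 winners.append(i if cij > cji else j)
--             elif rate[i] != rate[j]:
--                 winners.append(i if rate[i] > rate[j] else j)
--     return max((winners.count(k) for k in range(n)), default=0)
-- ===== Notes on version B (the rewrite author's own statement) =====
-- stated objective: alternative
-- what changed: A builds an n-by-n gift matrix and credits winners by scanning all n^2 ordered pairs; B parses gifts once into a (giver, receiver) index-pair list, derives gift rates from pair counts, and decides each unordered pair once in a single triangular pass, tallying winners from the collected winner list.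
import Mathlib
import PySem

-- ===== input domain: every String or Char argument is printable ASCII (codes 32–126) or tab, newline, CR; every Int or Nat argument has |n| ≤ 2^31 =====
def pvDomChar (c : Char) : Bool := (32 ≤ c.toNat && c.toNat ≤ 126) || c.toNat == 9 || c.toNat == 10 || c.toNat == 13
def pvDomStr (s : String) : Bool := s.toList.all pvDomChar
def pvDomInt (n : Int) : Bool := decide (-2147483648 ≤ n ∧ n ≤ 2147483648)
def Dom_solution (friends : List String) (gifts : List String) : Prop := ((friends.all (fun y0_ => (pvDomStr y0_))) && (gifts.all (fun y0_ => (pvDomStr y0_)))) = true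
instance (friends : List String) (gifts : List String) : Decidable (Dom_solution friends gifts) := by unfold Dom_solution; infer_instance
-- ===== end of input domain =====

-- B replaces A's n×n history matrix and full ordered-pair scan by a parsed pair list with
-- count lookups and a single triangular pass over unordered pairs (objective: alternative).

-- ===== PORT A =====
def solution (friends : List String) (gifts : List String) : Int :=
  -- f_dict[friends[i]] = i for i in range(len(friends))
  let fdict : PySem.Dict String Nat :=
    (List.range friends.length).foldl (fun d i => d.insert (friends.getD i "") i) PySem.Dict.empty
  -- f_history: n×n zero matrix, incremented per gift
  let hist : List (List Int) :=
    gifts.foldl (fun h g =>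
      match PySem.Str.split₀ g with
      | [g1, g2] =>
          let a := fdict.getD g1 0
          let b := fdict.getD g2 0
          h.set a ((h.getD a []).set b ((h.getD a []).getD b 0 + 1))
      | _ => h)  -- a gift that does not split in two: Python raises; outside Pre_
      (List.replicate friends.length (List.replicate friends.length 0))
  -- f_rate[i] = sum(f_history[i]) - sum over j of f_history[j][i]
  let frate : List Int :=
    (List.range friends.length).foldl (fun r i =>
      let fgive := (hist.getD i []).sum
      let fget := (List.range hist.length).foldl (fun s j => s + (hist.getD j []).getD i 0) 0
      r.set i (fgive - fget)) (List.replicate friends.length 0)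
  -- get[i] += 1 over all ordered pairs (i, j)
  let get : List Int :=
    (List.range friends.length).foldl (fun gl i =>
      (List.range friends.length).foldl (fun gl j =>
        if (hist.getD i []).getD j 0 > (hist.getD j []).getD i 0 then
          gl.set i (gl.getD i 0 + 1)
        else if (hist.getD i []).getD j 0 = (hist.getD j []).getD i 0 ∧ frate.getD i 0 > frate.getD j 0 then
          gl.set i (gl.getD i 0 + 1)
        else gl) gl) (List.replicate friends.length 0)
  match PySem.List.max? get (fun x => x) with
  | some m => m
  | none => 0  -- max([]) raises ValueError in Python; outside Pre_

-- ===== PORT B =====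
def solution_alt (friends : List String) (gifts : List String) : Int :=
  let n := friends.length
  -- idx = {name: k for k, name in enumerate(friends)}
  let idx : PySem.Dict String Nat :=
    friends.zipIdx.foldl (fun d p => d.insert p.1 p.2) PySem.Dict.empty
  -- pairs.append((idx[a], idx[b])) per gift
  let pairs : List (Nat × Nat) :=
    gifts.foldl (fun ps g =>
      let parts := PySem.Str.split₀ g
      if parts.length = 2 then
        ps ++ [(idx.getD (parts.getD 0 "") 0, idx.getD (parts.getD 1 "") 0)]
      else ps) []  -- a gift that does not split in two: Python raises; outside Pre_
  let givers := pairs.map Prod.fst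
  let receivers := pairs.map Prod.snd
  let rate : List Int := (List.range n).map (fun k => (givers.count k : Int) - (receivers.count k : Int))
  -- triangular pass: for i in range(n): for j in range(i+1, n)
  let winners : List Nat :=
    (List.range n).foldl (fun w i =>
      (List.range' (i + 1) (n - (i + 1))).foldl (fun w j =>
        let cij := pairs.count (i, j)
        let cji := pairs.count (j, i)
        if cij ≠ cji then w ++ [if cij > cji then i else j]
        else if rate.getD i 0 ≠ rate.getD j 0 then w ++ [if rate.getD i 0 > rate.getD j 0 then i else j]
        else w) w) []
  PySem.List.maxD ((List.range n).map (fun k => (winners.count k : Int))) (fun x => x) 0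

-- ===== PRECONDITION & SPEC =====
-- Pre_ excludes exactly the inputs where Python A raises: an empty friends list (max([]) is a
-- ValueError) and any gift that does not split into exactly two tokens naming friends
-- (ValueError on unpacking / KeyError on the dict lookup).
def Pre_solution (friends : List String) (gifts : List String) : Prop :=
  friends ≠ [] ∧ ∀ g ∈ gifts, (PySem.Str.split₀ g).length = 2 ∧ ∀ t ∈ PySem.Str.split₀ g, t ∈ friends
instance (friends : List String) (gifts : List String) : Decidable (Pre_solution friends gifts) := by
  unfold Pre_solution; infer_instance

def pvWitness_solution : List String × List String := (["muzi", "frodo"], ["muzi frodo", "frodo muzi", "muzi frodo"])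

def Spec_solution (friends : List String) (gifts : List String) (out : Int) : Prop := out = solution_alt friends gifts
instance (friends : List String) (gifts : List String) (out : Int) : Decidable (Spec_solution friends gifts out) := by unfold Spec_solution; infer_instance

-- ===== CLAIM (what is proved, stated in full; the proofs are below) =====
def Claim_equal_solution : Prop := ∀ (friends : List String) (gifts : List String), Dom_solution friends gifts → Pre_solution friends gifts → Spec_solution friends gifts (solution friends gifts)

-- ===== LEMMAS AND PROOFS =====
-- Proof-only helpers: a reference dictionary, the parsed (giver, receiver) index pairs,
-- and fold characterizations of both ports' loops, culminating in pvMain.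

def pvDict (friends : List String) : PySem.Dict String Nat :=
  friends.zipIdx.foldl (fun d p => d.insert p.1 p.2) PySem.Dict.empty

lemma pvDict_append (l : List String) (x : String) :
    pvDict (l ++ [x]) = (pvDict l).insert x l.length := by
  unfold pvDict
  rw [List.zipIdx_append, List.foldl_append]
  simp

lemma pvDict_lt (l : List String) (s : String) (hs : s ∈ l) :
    (pvDict l).getD s 0 < l.length := by
  induction l using List.reverseRecOn with
  | nil => simp at hs
  | append_singleton l x ih =>
    rw [pvDict_append]
    by_cases hx : s = x
    · subst hx; rw [PySem.Dict.getD_insert_self]; simp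
    · rw [PySem.Dict.getD_insert_of_ne _ _ _ hx]
      rcases List.mem_append.mp hs with h | h
      · have := ih h; simp; omega
      · simp at h; exact absurd h hx

lemma pvDictA_eq (l : List String) (e : PySem.Dict String Nat) :
    (List.range l.length).foldl (fun d i => d.insert (l.getD i "") i) e
      = l.zipIdx.foldl (fun d p => d.insert p.1 p.2) e := by
  induction l using List.reverseRecOn with
  | nil => simp
  | append_singleton l x ih =>
    have hlen : (l ++ [x]).length = l.length + 1 := by simp
    rw [hlen, List.range_succ, List.foldl_append, List.zipIdx_append, List.foldl_append]
    have hcongr : (List.range l.length).foldl (fun d i => d.insert ((l ++ [x]).getD i "") i) e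
        = (List.range l.length).foldl (fun d i => d.insert (l.getD i "") i) e := by
      apply PySem.List.foldl_congr_mem
      intro acc i hi
      rw [List.mem_range] at hi
      rw [List.getD_eq_getElem?_getD, List.getElem?_append_left hi, ← List.getD_eq_getElem?_getD]
    rw [hcongr, ih]
    simp [List.getD_eq_getElem?_getD]

def pvPf (d : PySem.Dict String Nat) (g : String) : List (Nat × Nat) :=
  match PySem.Str.split₀ g with
  | [a, b] => [(d.getD a 0, d.getD b 0)]
  | _ => []

def pvPairs (d : PySem.Dict String Nat) (gifts : List String) : List (Nat × Nat) :=
  gifts.flatMap (pvPf d)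

def pvStep (h : List (List Int)) (p : Nat × Nat) : List (List Int) :=
  h.set p.1 ((h.getD p.1 []).set p.2 ((h.getD p.1 []).getD p.2 0 + 1))

lemma pvHistA_eq (d : PySem.Dict String Nat) (gifts : List String) (h0 : List (List Int)) :
    gifts.foldl (fun h g =>
      match PySem.Str.split₀ g with
      | [g1, g2] =>
          let a := d.getD g1 0
          let b := d.getD g2 0
          h.set a ((h.getD a []).set b ((h.getD a []).getD b 0 + 1))
      | _ => h) h0
    = (pvPairs d gifts).foldl pvStep h0 := by
  induction gifts generalizing h0 with
  | nil => simp [pvPairs]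
  | cons g gs ih =>
    rw [List.foldl_cons]
    show _ = ((pvPairs d (g :: gs)).foldl pvStep h0)
    have : pvPairs d (g :: gs) = pvPf d g ++ pvPairs d gs := by simp [pvPairs]
    rw [this, List.foldl_append]
    rcases e : PySem.Str.split₀ g with _ | ⟨a, _ | ⟨b, _ | _⟩⟩ <;>
      simp only [e, pvPf, List.foldl_cons, List.foldl_nil] <;> exact ih _

lemma pvPairsB_eq (d : PySem.Dict String Nat) (gifts : List String) :
    gifts.foldl (fun ps g =>
      let parts := PySem.Str.split₀ g
      if parts.length = 2 then
        ps ++ [(d.getD (parts.getD 0 "") 0, d.getD (parts.getD 1 "") 0)]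
      else ps) [] = pvPairs d gifts := by
  have : ∀ acc, gifts.foldl (fun ps g =>
      let parts := PySem.Str.split₀ g
      if parts.length = 2 then
        ps ++ [(d.getD (parts.getD 0 "") 0, d.getD (parts.getD 1 "") 0)]
      else ps) acc = acc ++ pvPairs d gifts := by
    intro acc
    rw [PySem.List.foldl_congr_mem gifts _ (fun ps g => ps ++ pvPf d g) acc ?_]
    · exact PySem.List.foldl_append_eq_flatMap (pvPf d) gifts acc
    · intro ps g _
      rcases e : PySem.Str.split₀ g with _ | ⟨a, _ | ⟨b, _ | _⟩⟩ <;> simp [pvPf, e]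
  simpa using this []

lemma pvStep_len (h : List (List Int)) (p : Nat × Nat) : (pvStep h p).length = h.length := by
  simp [pvStep]

lemma pvStep_row_len (h : List (List Int)) (p : Nat × Nat) (i : Nat) :
    ((pvStep h p).getD i []).length = (h.getD i []).length := by
  unfold pvStep
  rw [List.getD_eq_getElem?_getD, List.getElem?_set]
  split_ifs with h1 h2
  · subst h1; simp [List.getD_eq_getElem?_getD]
  · subst h1
    have : h[p.1]? = none := by
      rw [List.getElem?_eq_none_iff]; omega
    simp [List.getD_eq_getElem?_getD, this]
  · rw [← List.getD_eq_getElem?_getD]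

lemma pvStep_entry (h : List (List Int)) (p : Nat × Nat)
    (h1 : p.1 < h.length) (h2 : p.2 < (h.getD p.1 []).length) (i j : Nat) :
    ((pvStep h p).getD i []).getD j 0
      = (h.getD i []).getD j 0 + (if i = p.1 ∧ j = p.2 then 1 else 0) := by
  unfold pvStep
  rw [List.getD_eq_getElem?_getD (l := (h.set p.1 _)), List.getElem?_set]
  by_cases hi : p.1 = i
  · subst hi
    rw [if_pos rfl, if_pos h1, Option.getD_some]
    rw [List.getD_eq_getElem?_getD (l := (h.getD p.1 []).set p.2 _), List.getElem?_set]
    by_cases hj : p.2 = j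
    · subst hj
      rw [if_pos rfl, if_pos h2, Option.getD_some]
      simp [List.getD_eq_getElem?_getD]
    · simp only [if_neg hj]
      rw [← List.getD_eq_getElem?_getD]
      simp [Ne.symm hj]
  · simp only [if_neg hi]
    rw [← List.getD_eq_getElem?_getD]
    have : ¬(i = p.1 ∧ j = p.2) := by tauto
    simp [this]

lemma pvFold_len (ps : List (Nat × Nat)) (h : List (List Int)) :
    (ps.foldl pvStep h).length = h.length := by
  induction ps generalizing h with
  | nil => rfl
  | cons p ps ih => rw [List.foldl_cons, ih, pvStep_len]

lemma pvFold_row_len (ps : List (Nat × Nat)) (h : List (List Int)) (i : Nat) :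
    ((ps.foldl pvStep h).getD i []).length = (h.getD i []).length := by
  induction ps generalizing h with
  | nil => rfl
  | cons p ps ih => rw [List.foldl_cons, ih, pvStep_row_len]

lemma pvFold_entry (ps : List (Nat × Nat)) (h : List (List Int))
    (hps : ∀ p ∈ ps, p.1 < h.length ∧ p.2 < (h.getD p.1 []).length) (i j : Nat) :
    ((ps.foldl pvStep h).getD i []).getD j 0
      = (h.getD i []).getD j 0 + (ps.count (i, j) : Int) := by
  induction ps generalizing h with
  | nil => simp
  | cons p ps ih =>
    rw [List.foldl_cons]
    have hp := hps p (List.mem_cons_self ..)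
    rw [ih (pvStep h p) ?_]
    · rw [pvStep_entry h p hp.1 hp.2 i j]
      rw [List.count_cons]
      have : (p == (i, j)) = decide (i = p.1 ∧ j = p.2) := by
        rcases p with ⟨a, b⟩
        by_cases hij : i = a ∧ j = b
        · obtain ⟨rfl, rfl⟩ := hij; simp
        · rw [decide_eq_false hij, beq_eq_false_iff_ne]
          intro he
          obtain ⟨rfl, rfl⟩ := Prod.mk.injEq .. ▸ he
          exact hij ⟨rfl, rfl⟩
      rw [this]
      by_cases hij : i = p.1 ∧ j = p.2
      · rw [if_pos hij, decide_eq_true hij]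
        norm_num
        ring
      · rw [if_neg hij, decide_eq_false hij]
        norm_num
    · intro q hq
      rw [pvStep_len, pvStep_row_len]
      exact hps q (List.mem_cons_of_mem _ hq)

lemma pvFoldSet_getElem? (F : Nat → Int) :
    ∀ (cnt m : Nat) (l0 : List Int), m + cnt ≤ l0.length →
    ∀ k, ((List.range' m cnt).foldl (fun r i => r.set i (F i)) l0)[k]?
      = if m ≤ k ∧ k < m + cnt then some (F k) else l0[k]? := by
  intro cnt
  induction cnt with
  | zero => intro m l0 _ k; rw [if_neg (by omega)]; simp
  | succ c ih =>
    intro m l0 hle k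
    rw [List.range'_succ, List.foldl_cons]
    rw [ih (m + 1) _ (by simpa [List.length_set] using by omega) k]
    by_cases hk : m + 1 ≤ k ∧ k < m + 1 + c
    · rw [if_pos hk, if_pos (by omega)]
    · rw [if_neg hk, List.getElem?_set]
      by_cases hm : m = k
      · subst hm
        rw [if_pos rfl, if_pos (by omega), if_pos (by omega)]
      · rw [if_neg hm, if_neg (by omega)]

lemma pvInc_getElem? (P : Nat → Bool) :
    ∀ (js : List Nat) (gl : List Int) (i k : Nat),
    (js.foldl (fun gl j => if P j then gl.set i (gl.getD i 0 + 1) else gl) gl)[k]?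
      = if k = i ∧ i < gl.length then some (gl.getD i 0 + (js.countP P : Int)) else gl[k]? := by
  intro js
  induction js with
  | nil =>
    intro gl i k
    simp only [List.foldl_nil, List.countP_nil, Nat.cast_zero, add_zero]
    by_cases hk : k = i ∧ i < gl.length
    · obtain ⟨rfl, hi⟩ := hk
      rw [if_pos ⟨rfl, hi⟩, List.getD_eq_getElem?_getD, List.getElem?_eq_getElem hi]
      simp
    · rw [if_neg hk]
  | cons j js ih =>
    intro gl i k
    rw [List.foldl_cons, List.countP_cons]
    by_cases hj : P j
    · rw [if_pos hj, ih]
      simp only [List.length_set]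
      by_cases hk : k = i ∧ i < gl.length
      · obtain ⟨rfl, hi⟩ := hk
        rw [if_pos ⟨rfl, hi⟩, if_pos ⟨rfl, hi⟩]
        have hset : (gl.set k (gl.getD k 0 + 1)).getD k 0 = gl.getD k 0 + 1 := by
          rw [List.getD_eq_getElem?_getD, List.getElem?_set, if_pos rfl, if_pos hi]
          simp
        rw [hset, hj]
        simp only [if_true]
        congr 1
        push_cast
        ring
      · rw [if_neg hk, if_neg hk, List.getElem?_set]
        rcases not_and_or.mp hk with h | h
        · rw [if_neg (fun he => h he.symm)]
        · by_cases hik : i = k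
          · rw [if_pos hik, if_neg (by omega)]
            symm
            rw [List.getElem?_eq_none_iff]
            omega
          · rw [if_neg hik]
    · rw [if_neg hj, ih]
      simp [hj]

lemma pvInc_eq_set (P : Nat → Bool) (js : List Nat) (gl : List Int) (i : Nat) :
    js.foldl (fun gl j => if P j then gl.set i (gl.getD i 0 + 1) else gl) gl
      = gl.set i (gl.getD i 0 + (js.countP P : Int)) := by
  apply List.ext_getElem?
  intro k
  rw [pvInc_getElem?, List.getElem?_set]
  by_cases hik : i = k
  · subst hik
    by_cases hi : i < gl.length
    · rw [if_pos ⟨rfl, hi⟩, if_pos rfl, if_pos hi]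
    · rw [if_neg (by tauto), if_pos rfl, if_neg hi, List.getElem?_eq_none_iff]
      omega
  · rw [if_neg (by tauto), if_neg hik]

lemma pvFoldSetAdd_getElem? (W : Nat → Int) :
    ∀ (cnt m : Nat) (l0 : List Int), m + cnt ≤ l0.length →
    (∀ t, m ≤ t → t < m + cnt → l0.getD t 0 = 0) →
    ∀ k, ((List.range' m cnt).foldl (fun gl i => gl.set i (gl.getD i 0 + W i)) l0)[k]?
      = if m ≤ k ∧ k < m + cnt then some (W k) else l0[k]? := by
  intro cnt
  induction cnt with
  | zero => intro m l0 _ _ k; rw [if_neg (by omega)]; simp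
  | succ c ih =>
    intro m l0 hle h0 k
    rw [List.range'_succ, List.foldl_cons]
    have hm : m < l0.length := by omega
    have hgm : l0.getD m 0 = 0 := h0 m le_rfl (by omega)
    rw [ih (m + 1) _ (by simpa [List.length_set] using by omega) ?_ k]
    · by_cases hk : m + 1 ≤ k ∧ k < m + 1 + c
      · rw [if_pos hk, if_pos (by omega)]
      · rw [if_neg hk, List.getElem?_set]
        by_cases hmk : m = k
        · subst hmk
          rw [if_pos rfl, if_pos hm, if_pos (by omega), hgm, zero_add]
        · rw [if_neg hmk, if_neg (by omega)]
    · intro t h1 h2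
      rw [List.getD_eq_getElem?_getD, List.getElem?_set, if_neg (by omega),
        ← List.getD_eq_getElem?_getD]
      exact h0 t (by omega) (by omega)

lemma pvSum_ite_nat (p : Nat → Bool) (l : List Nat) :
    (l.map (fun x => if p x then 1 else 0)).sum = l.countP p := by
  induction l with
  | nil => rfl
  | cons x l ih =>
    rw [List.map_cons, List.sum_cons, ih, List.countP_cons]
    by_cases hx : p x <;> simp [hx] <;> omega

lemma pvSum_indicator (l : List Nat) (hl : l.Nodup) (c : Nat) (v : Nat → Nat) :
    (l.map (fun j => if j = c then v j else 0)).sum = if c ∈ l then v c else 0 := by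
  induction l with
  | nil => simp
  | cons x l ih =>
    rw [List.map_cons, List.sum_cons, ih hl.of_cons]
    by_cases hx : x = c
    · subst hx
      rw [if_pos rfl, if_pos (List.mem_cons_self ..), if_neg (by
        intro hc; exact (List.nodup_cons.mp hl).1 hc), add_zero]
    · rw [if_neg hx]
      by_cases hc : c ∈ l
      · simp [hc, List.mem_cons, Ne.symm hx]
      · simp only [List.mem_cons, hc, or_false]
        rw [if_neg (fun h : c = x => hx h.symm)]
        simp

lemma pvSum_count_pair (n : Nat) (i c2 : Nat) (hc2 : c2 < n) (c1 : Nat) :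
    ((List.range n).map (fun j => if (c1, c2) = (i, j) then (1 : Int) else 0)).sum
      = if c1 = i then 1 else 0 := by
  by_cases hc1 : c1 = i
  · subst hc1
    rw [if_pos rfl]
    have hmap : (List.range n).map (fun j => if (c1, c2) = (c1, j) then (1 : Int) else 0)
        = (List.range n).map (fun j => if j = c2 then (1 : Int) else 0) := by
      apply List.map_congr_left
      intro j _
      by_cases hj : j = c2
      · subst hj; simp
      · rw [if_neg (by simp [Ne.symm hj]), if_neg hj]
    rw [hmap]
    have : ∀ j : Nat, (if j = c2 then (1 : Int) else 0) = if decide (j = c2) then (1 : Int) else 0 := by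
      intro j; by_cases hj : j = c2 <;> simp [hj]
    simp only [this]
    rw [PySem.List.sum_map_ite_one_zero]
    have : List.countP (fun j => decide (j = c2)) (List.range n) = List.count c2 (List.range n) := by
      apply List.countP_congr
      intro j _
      by_cases h : j = c2 <;> simp [h]
    rw [this, List.count_eq_one_of_mem (List.nodup_range) (List.mem_range.mpr hc2)]
    simp
  · rw [if_neg hc1]
    have hmap : (List.range n).map (fun j => if (c1, c2) = (i, j) then (1 : Int) else 0)
        = (List.range n).map (fun _ => (0 : Int)) := by
      apply List.map_congr_left
      intro j _
      rw [if_neg (by simp [hc1])]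
    rw [hmap, PySem.List.sum_map_const_int]
    ring

lemma pvCount_fst (pr : List (Nat × Nat)) (n i : Nat) (hp : ∀ p ∈ pr, p.2 < n) :
    ((List.range n).map (fun j => (pr.count (i, j) : Int))).sum
      = ((pr.map Prod.fst).count i : Int) := by
  induction pr with
  | nil => simp
  | cons p pr ih =>
    have hmap : (List.range n).map (fun j => (List.count (i, j) (p :: pr) : Int))
        = (List.range n).map (fun j => (List.count (i, j) pr : Int)
            + if p = (i, j) then (1 : Int) else 0) := by
      apply List.map_congr_left
      intro j _
      rw [List.count_cons]
      by_cases hpij : p = (i, j)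
      · simp only [hpij, beq_self_eq_true, if_true]; push_cast; ring
      · have : (p == (i, j)) = false := by
          rw [beq_eq_false_iff_ne]; exact hpij
        simp only [this, Bool.false_eq_true, if_false, if_neg hpij]; push_cast; ring
    rw [hmap, PySem.List.sum_map_add_int, ih (fun q hq => hp q (List.mem_cons_of_mem _ hq))]
    rw [pvSum_count_pair n i p.2 (hp p (List.mem_cons_self ..)) p.1]
    rw [List.map_cons, List.count_cons]
    by_cases h1 : p.1 = i
    · rw [if_pos h1, if_pos (by simp [h1])]; push_cast; ring
    · rw [if_neg h1, if_neg (by simp [h1])]; push_cast; ring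

lemma pvCount_snd (pr : List (Nat × Nat)) (n i : Nat) (hp : ∀ p ∈ pr, p.1 < n) :
    ((List.range n).map (fun j => (pr.count (j, i) : Int))).sum
      = ((pr.map Prod.snd).count i : Int) := by
  have := pvCount_fst (pr.map (fun p => (p.2, p.1))) n i (by
    intro q hq
    rw [List.mem_map] at hq
    obtain ⟨p, hpm, rfl⟩ := hq
    exact hp p hpm)
  have hmap : ∀ j : Nat, List.count (i, j) (pr.map (fun p => (p.2, p.1))) = List.count (j, i) pr := by
    intro j
    rw [List.count_eq_countP, List.count_eq_countP, List.countP_map]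
    apply List.countP_congr
    intro p _
    simp [Prod.ext_iff, and_comm]
  have hfst : (pr.map (fun p => (p.2, p.1))).map Prod.fst = pr.map Prod.snd := by
    rw [List.map_map]; rfl
  rw [← hfst]
  rw [← this]
  apply congrArg
  apply List.map_congr_left
  intro j _
  rw [hmap]

def pvFdictA (friends : List String) : PySem.Dict String Nat :=
  (List.range friends.length).foldl (fun d i => d.insert (friends.getD i "") i) PySem.Dict.empty

def pvHistA (friends : List String) (gifts : List String) : List (List Int) :=
  gifts.foldl (fun h g =>
    match PySem.Str.split₀ g with
    | [g1, g2] =>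
        let a := (pvFdictA friends).getD g1 0
        let b := (pvFdictA friends).getD g2 0
        h.set a ((h.getD a []).set b ((h.getD a []).getD b 0 + 1))
    | _ => h) (List.replicate friends.length (List.replicate friends.length 0))

def pvFgetA (friends : List String) (gifts : List String) (i : Nat) : Int :=
  (List.range (pvHistA friends gifts).length).foldl
    (fun s j => s + ((pvHistA friends gifts).getD j []).getD i 0) 0

def pvFA (friends : List String) (gifts : List String) (i : Nat) : Int :=
  ((pvHistA friends gifts).getD i []).sum - pvFgetA friends gifts i

def pvFrateA (friends : List String) (gifts : List String) : List Int :=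
  (List.range friends.length).foldl (fun r i => r.set i (pvFA friends gifts i))
    (List.replicate friends.length 0)

def pvGetA (friends : List String) (gifts : List String) : List Int :=
  (List.range friends.length).foldl (fun gl i =>
    (List.range friends.length).foldl (fun gl j =>
      if ((pvHistA friends gifts).getD i []).getD j 0 > ((pvHistA friends gifts).getD j []).getD i 0 then
        gl.set i (gl.getD i 0 + 1)
      else if ((pvHistA friends gifts).getD i []).getD j 0 = ((pvHistA friends gifts).getD j []).getD i 0
          ∧ (pvFrateA friends gifts).getD i 0 > (pvFrateA friends gifts).getD j 0 then
        gl.set i (gl.getD i 0 + 1)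
      else gl) gl) (List.replicate friends.length 0)

lemma pvSolutionA_eq (friends gifts : List String) :
    solution friends gifts = (PySem.List.max? (pvGetA friends gifts) (fun x => x)).getD 0 := by
  show (match PySem.List.max? (pvGetA friends gifts) (fun x => x) with
        | some m => m
        | none => 0) = _
  cases PySem.List.max? (pvGetA friends gifts) (fun x => x) <;> rfl

def pvPairsB (friends : List String) (gifts : List String) : List (Nat × Nat) :=
  gifts.foldl (fun ps g =>
    let parts := PySem.Str.split₀ g
    if parts.length = 2 then
      ps ++ [((pvDict friends).getD (parts.getD 0 "") 0, (pvDict friends).getD (parts.getD 1 "") 0)]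
    else ps) []

def pvRateB (friends : List String) (gifts : List String) : List Int :=
  (List.range friends.length).map (fun k =>
    (((pvPairsB friends gifts).map Prod.fst).count k : Int)
      - (((pvPairsB friends gifts).map Prod.snd).count k : Int))

def pvWinnersB (friends : List String) (gifts : List String) : List Nat :=
  (List.range friends.length).foldl (fun w i =>
    (List.range' (i + 1) (friends.length - (i + 1))).foldl (fun w j =>
      if (pvPairsB friends gifts).count (i, j) ≠ (pvPairsB friends gifts).count (j, i) then
        w ++ [if (pvPairsB friends gifts).count (i, j) > (pvPairsB friends gifts).count (j, i) then i else j]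
      else if (pvRateB friends gifts).getD i 0 ≠ (pvRateB friends gifts).getD j 0 then
        w ++ [if (pvRateB friends gifts).getD i 0 > (pvRateB friends gifts).getD j 0 then i else j]
      else w) w) []

lemma pvSolutionB_eq (friends gifts : List String) :
    solution_alt friends gifts
      = PySem.List.maxD ((List.range friends.length).map
          (fun k => ((pvWinnersB friends gifts).count k : Int))) (fun x => x) 0 := rfl

lemma pvIf_or {α : Type} (A B : Prop) [Decidable A] [Decidable B] (x y : α) :
    (if A then x else if B then x else y) = if A ∨ B then x else y := by
  by_cases hA : A
  · simp [hA]
  · by_cases hB : B <;> simp [hA, hB]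

def pvR (pr : List (Nat × Nat)) (k : Nat) : Int :=
  ((pr.map Prod.fst).count k : Int) - ((pr.map Prod.snd).count k : Int)

def pvWb (pr : List (Nat × Nat)) (R : Nat → Int) (i j : Nat) : Bool :=
  decide (pr.count (j, i) < pr.count (i, j))
    || (decide (pr.count (i, j) = pr.count (j, i)) && decide (R j < R i))

lemma pvWb_asymm (pr : List (Nat × Nat)) (R : Nat → Int) (i j : Nat)
    (h : pvWb pr R i j = true) : pvWb pr R j i = false := by
  simp only [pvWb, Bool.or_eq_true, decide_eq_true_eq, Bool.and_eq_true] at h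
  simp only [pvWb, Bool.or_eq_false_iff, decide_eq_false_iff_not, Bool.and_eq_false_iff]
  constructor
  · omega
  · rcases h with h | h
    · left; omega
    · right; omega

def pvWl (pr : List (Nat × Nat)) (R : Nat → Int) (i j : Nat) : List Nat :=
  if pvWb pr R i j then [i] else if pvWb pr R j i then [j] else []

lemma pvWb_irrefl (pr : List (Nat × Nat)) (R : Nat → Int) (i : Nat) :
    pvWb pr R i i = false := by
  simp [pvWb]

lemma pvWl_branch (pr : List (Nat × Nat)) (R : Nat → Int) (i j : Nat) (acc : List Nat) :
    (if pr.count (i, j) ≠ pr.count (j, i) then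
       acc ++ [if pr.count (i, j) > pr.count (j, i) then i else j]
     else if R i ≠ R j then acc ++ [if R i > R j then i else j]
     else acc)
    = acc ++ pvWl pr R i j := by
  unfold pvWl
  by_cases h1 : pr.count (j, i) < pr.count (i, j)
  · rw [if_pos (by omega : pr.count (i, j) ≠ pr.count (j, i)), if_pos (by omega), 
      if_pos (by simp [pvWb, h1] : pvWb pr R i j = true)]
  · by_cases h2 : pr.count (i, j) < pr.count (j, i)
    · rw [if_pos (by omega : pr.count (i, j) ≠ pr.count (j, i)), if_neg (by omega),
        if_neg (by simp [pvWb]; omega : ¬ pvWb pr R i j = true),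
        if_pos (by simp [pvWb, h2] : pvWb pr R j i = true)]
    · have hceq : pr.count (i, j) = pr.count (j, i) := by omega
      rw [if_neg (by omega : ¬ pr.count (i, j) ≠ pr.count (j, i))]
      by_cases h3 : R j < R i
      · rw [if_pos (by omega : R i ≠ R j), if_pos (by omega),
          if_pos (by simp [pvWb, hceq, h3] : pvWb pr R i j = true)]
      · by_cases h4 : R i < R j
        · rw [if_pos (by omega : R i ≠ R j), if_neg (by omega),
            if_neg (by simp [pvWb, hceq]; omega : ¬ pvWb pr R i j = true),
            if_pos (by simp [pvWb, hceq.symm, h4] : pvWb pr R j i = true)]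
        · rw [if_neg (by omega : ¬ R i ≠ R j),
            if_neg (by simp [pvWb, hceq]; omega : ¬ pvWb pr R i j = true),
            if_neg (by simp [pvWb, hceq.symm]; omega : ¬ pvWb pr R j i = true)]
          simp

theorem pvMain (friends gifts : List String)
    (hwf : ∀ g ∈ gifts, (PySem.Str.split₀ g).length = 2 ∧ ∀ t ∈ PySem.Str.split₀ g, t ∈ friends) :
    solution friends gifts = solution_alt friends gifts := by
  have hdict : pvFdictA friends = pvDict friends := pvDictA_eq friends PySem.Dict.empty
  -- the parsed pair list
  have hprlt : ∀ p ∈ pvPairs (pvDict friends) gifts,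
      p.1 < friends.length ∧ p.2 < friends.length := by
    intro p hp
    obtain ⟨g, hg, hpg⟩ := List.mem_flatMap.mp hp
    rcases e : PySem.Str.split₀ g with _ | ⟨a, _ | ⟨b, _ | _⟩⟩ <;>
      rw [pvPf, e] at hpg <;> try simp at hpg
    · obtain rfl := hpg
      have hmem := (hwf g hg).2
      rw [e] at hmem
      exact ⟨pvDict_lt friends a (hmem a (by simp)), pvDict_lt friends b (hmem b (by simp))⟩
  have hhist : pvHistA friends gifts
      = (pvPairs (pvDict friends) gifts).foldl pvStep
          (List.replicate friends.length (List.replicate friends.length 0)) := by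
    unfold pvHistA
    rw [hdict]
    exact pvHistA_eq (pvDict friends) gifts _
  have hlen : (pvHistA friends gifts).length = friends.length := by
    rw [hhist, pvFold_len, List.length_replicate]
  have hrowlen : ∀ i, i < friends.length →
      ((pvHistA friends gifts).getD i []).length = friends.length := by
    intro i hi
    rw [hhist, pvFold_row_len, List.getD_eq_getElem?_getD, List.getElem?_replicate,
      if_pos hi]
    simp
  have hentry : ∀ i j, ((pvHistA friends gifts).getD i []).getD j 0
      = ((pvPairs (pvDict friends) gifts).count (i, j) : Int) := by
    intro i j
    rw [hhist, pvFold_entry _ _ ?_ i j]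
    · have hb : ((List.replicate friends.length (List.replicate friends.length (0 : Int))).getD i []).getD j 0 = 0 := by
        by_cases hi : i < friends.length
        · rw [List.getD_eq_getElem?_getD
              (l := List.replicate friends.length (List.replicate friends.length (0 : Int))),
            List.getElem?_replicate, if_pos hi, Option.getD_some,
            List.getD_eq_getElem?_getD, List.getElem?_replicate]
          split_ifs <;> simp
        · rw [List.getD_eq_getElem?_getD
              (l := List.replicate friends.length (List.replicate friends.length (0 : Int))),
            List.getElem?_replicate, if_neg hi]
          simp
      rw [hb, zero_add]
    · intro p hp
      have := hprlt p hp
      constructor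
      · rw [List.length_replicate]; exact this.1
      · rw [List.getD_eq_getElem?_getD, List.getElem?_replicate, if_pos this.1]
        simpa using this.2
  have hrow : ∀ i, i < friends.length → (pvHistA friends gifts).getD i []
      = (List.range friends.length).map
          (fun j => ((pvPairs (pvDict friends) gifts).count (i, j) : Int)) := by
    intro i hi
    apply List.ext_getElem
    · rw [hrowlen i hi, List.length_map, List.length_range]
    · intro j h1 h2
      rw [List.getElem_map, List.getElem_range]
      rw [← List.getD_eq_getElem _ 0 h1, hentry]
  -- rates
  have hFrate : ∀ k, (pvFrateA friends gifts)[k]? =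
      if k < friends.length then some (pvFA friends gifts k) else none := by
    intro k
    unfold pvFrateA
    rw [List.range_eq_range']
    rw [pvFoldSet_getElem? (pvFA friends gifts) friends.length 0 _ (by simp)]
    simp only [Nat.zero_add, Nat.zero_le, true_and]
    by_cases hk : k < friends.length
    · rw [if_pos hk, if_pos hk]
    · rw [if_neg hk, if_neg hk, List.getElem?_replicate, if_neg hk]
  have hrateA : ∀ i, i < friends.length → (pvFrateA friends gifts).getD i 0
      = (((pvPairs (pvDict friends) gifts).map Prod.fst).count i : Int)
        - (((pvPairs (pvDict friends) gifts).map Prod.snd).count i : Int) := by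
    intro i hi
    rw [List.getD_eq_getElem?_getD, hFrate i, if_pos hi, Option.getD_some]
    unfold pvFA pvFgetA
    rw [hrow i hi]
    rw [pvCount_fst _ _ _ (fun p hp => (hprlt p hp).2)]
    rw [PySem.List.foldl_add]
    rw [hlen]
    have hm : (List.range friends.length).map
        (fun j => ((pvHistA friends gifts).getD j []).getD i 0)
        = (List.range friends.length).map
            (fun j => ((pvPairs (pvDict friends) gifts).count (j, i) : Int)) := by
      apply List.map_congr_left
      intro j _
      exact hentry j i
    rw [hm, pvCount_snd _ _ _ (fun p hp => (hprlt p hp).1), zero_add]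
  have hpairsB : pvPairsB friends gifts = pvPairs (pvDict friends) gifts :=
    pvPairsB_eq (pvDict friends) gifts
  have hrateB : ∀ i, i < friends.length → (pvRateB friends gifts).getD i 0
      = (((pvPairs (pvDict friends) gifts).map Prod.fst).count i : Int)
        - (((pvPairs (pvDict friends) gifts).map Prod.snd).count i : Int) := by
    intro i hi
    unfold pvRateB
    rw [hpairsB, List.getD_eq_getElem?_getD, List.getElem?_map, List.getElem?_range hi]
    simp
  -- A's get list
  have hGetA : pvGetA friends gifts = (List.range friends.length).map
      (fun k => (((List.range friends.length).countP
        (fun j => pvWb (pvPairs (pvDict friends) gifts)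
          (pvR (pvPairs (pvDict friends) gifts)) k j)) : Int)) := by
    unfold pvGetA
    have hbody : ∀ (gl : List Int), ∀ i ∈ List.range friends.length,
        (List.range friends.length).foldl
          (fun gl j =>
            if ((pvHistA friends gifts).getD i []).getD j 0
                > ((pvHistA friends gifts).getD j []).getD i 0 then gl.set i (gl.getD i 0 + 1)
            else if ((pvHistA friends gifts).getD i []).getD j 0
                  = ((pvHistA friends gifts).getD j []).getD i 0
                ∧ (pvFrateA friends gifts).getD i 0 > (pvFrateA friends gifts).getD j 0 then
              gl.set i (gl.getD i 0 + 1)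
            else gl) gl
        = gl.set i (gl.getD i 0 + (((List.range friends.length).countP
            (fun j => pvWb (pvPairs (pvDict friends) gifts)
              (pvR (pvPairs (pvDict friends) gifts)) i j)) : Int)) := by
      intro gl i hi
      rw [List.mem_range] at hi
      rw [PySem.List.foldl_congr_mem _ _
        (fun gl j => if pvWb (pvPairs (pvDict friends) gifts)
            (pvR (pvPairs (pvDict friends) gifts)) i j then gl.set i (gl.getD i 0 + 1) else gl)
        gl ?_]
      · exact pvInc_eq_set _ _ gl i
      · intro acc j hj
        rw [List.mem_range] at hj
        rw [hentry i j, hentry j i, hrateA i hi, hrateA j hj, pvIf_or]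
        have hiff : ((((pvPairs (pvDict friends) gifts).count (i, j) : Int)
              > ((pvPairs (pvDict friends) gifts).count (j, i) : Int))
            ∨ (((pvPairs (pvDict friends) gifts).count (i, j) : Int)
                = ((pvPairs (pvDict friends) gifts).count (j, i) : Int)
              ∧ (((pvPairs (pvDict friends) gifts).map Prod.fst).count i : Int)
                  - (((pvPairs (pvDict friends) gifts).map Prod.snd).count i : Int)
                > (((pvPairs (pvDict friends) gifts).map Prod.fst).count j : Int)
                  - (((pvPairs (pvDict friends) gifts).map Prod.snd).count j : Int)))
            ↔ (pvWb (pvPairs (pvDict friends) gifts)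
                (pvR (pvPairs (pvDict friends) gifts)) i j = true) := by
          simp only [pvWb, pvR, Bool.or_eq_true, decide_eq_true_eq, Bool.and_eq_true,
            gt_iff_lt, Nat.cast_lt, Nat.cast_inj]
        exact if_congr hiff rfl rfl
    rw [PySem.List.foldl_congr_mem _ _
      (fun gl i => gl.set i (gl.getD i 0 + (((List.range friends.length).countP
        (fun j => pvWb (pvPairs (pvDict friends) gifts)
          (pvR (pvPairs (pvDict friends) gifts)) i j)) : Int))) _ hbody]
    apply List.ext_getElem?
    intro k
    rw [List.range_eq_range']
    rw [pvFoldSetAdd_getElem? _ friends.length 0 _ (by simp) ?_ k]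
    · simp only [Nat.zero_add, Nat.zero_le, true_and]
      by_cases hk : k < friends.length
      · rw [if_pos hk, List.getElem?_map, ← List.range_eq_range', List.getElem?_range hk]
        rfl
      · rw [if_neg hk, List.getElem?_replicate, if_neg hk, List.getElem?_map,
          ← List.range_eq_range',
          List.getElem?_eq_none (by simpa using not_lt.mp hk)]
        rfl
    · intro t _ ht
      rw [List.getD_eq_getElem?_getD, List.getElem?_replicate, if_pos (by omega)]
      simp
  -- B's winners as a flatMap over the triangle
  have hwin : pvWinnersB friends gifts = (List.range friends.length).flatMap
      (fun i => (List.range' (i + 1) (friends.length - (i + 1))).flatMap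
        (fun j => pvWl (pvPairs (pvDict friends) gifts)
          (pvR (pvPairs (pvDict friends) gifts)) i j)) := by
    unfold pvWinnersB
    rw [PySem.List.foldl_congr_mem _ _
      (fun w i => w ++ (List.range' (i + 1) (friends.length - (i + 1))).flatMap
        (fun j => pvWl (pvPairs (pvDict friends) gifts)
          (pvR (pvPairs (pvDict friends) gifts)) i j)) [] ?_]
    · rw [PySem.List.foldl_append_eq_flatMap]
      simp
    · intro w i hi
      rw [List.mem_range] at hi
      rw [PySem.List.foldl_congr_mem _ _
        (fun w j => w ++ pvWl (pvPairs (pvDict friends) gifts)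
          (pvR (pvPairs (pvDict friends) gifts)) i j) w ?_]
      · exact PySem.List.foldl_append_eq_flatMap _ _ w
      · intro acc j hj
        have hj' : i + 1 ≤ j ∧ j < friends.length := by
          have := List.mem_range'_1.mp hj
          omega
        rw [hpairsB, hrateB i hi, hrateB j hj'.2]
        have := pvWl_branch (pvPairs (pvDict friends) gifts)
          (pvR (pvPairs (pvDict friends) gifts)) i j acc
        simp only [pvR] at this
        exact this
  -- the counting argument: A's ordered-pair credits equal B's triangular winner tallies
  have hcnt : ∀ k, k < friends.length →
      ((List.range friends.length).countP
        (fun j => pvWb (pvPairs (pvDict friends) gifts)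
          (pvR (pvPairs (pvDict friends) gifts)) k j))
        = (pvWinnersB friends gifts).count k := by
    intro k hk
    rw [hwin, List.count_flatMap]
    have hterm : (List.range friends.length).map
        (List.count k ∘ (fun i => (List.range' (i + 1) (friends.length - (i + 1))).flatMap
          (fun j => pvWl (pvPairs (pvDict friends) gifts)
            (pvR (pvPairs (pvDict friends) gifts)) i j)))
        = (List.range friends.length).map (fun i =>
            if i = k then (List.range' (k + 1) (friends.length - (k + 1))).countP
                (fun j => pvWb (pvPairs (pvDict friends) gifts)
                  (pvR (pvPairs (pvDict friends) gifts)) k j)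
            else if i < k ∧ pvWb (pvPairs (pvDict friends) gifts)
                (pvR (pvPairs (pvDict friends) gifts)) k i = true then 1 else 0) := by
      apply List.map_congr_left
      intro i hi
      rw [List.mem_range] at hi
      simp only [Function.comp_apply]
      rw [List.count_flatMap]
      by_cases hik : i = k
      · subst hik
        rw [if_pos rfl]
        have hm : (List.range' (i + 1) (friends.length - (i + 1))).map
            (List.count i ∘ (fun j => pvWl (pvPairs (pvDict friends) gifts)
              (pvR (pvPairs (pvDict friends) gifts)) i j))
            = (List.range' (i + 1) (friends.length - (i + 1))).map
              (fun j => if pvWb (pvPairs (pvDict friends) gifts)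
                (pvR (pvPairs (pvDict friends) gifts)) i j then 1 else 0) := by
          apply List.map_congr_left
          intro j hj
          have hj' := List.mem_range'_1.mp hj
          have hij : i ≠ j := by omega
          simp only [Function.comp_apply, pvWl]
          split_ifs with h1 h2
          · simp
          · simp only [List.count_singleton]
            rw [if_neg (by simp only [beq_iff_eq]; omega)]
          · simp
        rw [hm, pvSum_ite_nat]
      · rw [if_neg hik]
        have hm : (List.range' (i + 1) (friends.length - (i + 1))).map
            (List.count k ∘ (fun j => pvWl (pvPairs (pvDict friends) gifts)
              (pvR (pvPairs (pvDict friends) gifts)) i j))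
            = (List.range' (i + 1) (friends.length - (i + 1))).map
              (fun j => if j = k then (if pvWb (pvPairs (pvDict friends) gifts)
                (pvR (pvPairs (pvDict friends) gifts)) k i then 1 else 0) else 0) := by
          apply List.map_congr_left
          intro j hj
          have hj' := List.mem_range'_1.mp hj
          simp only [Function.comp_apply]
          by_cases hjk : j = k
          · subst hjk
            rw [if_pos rfl]
            unfold pvWl
            by_cases h1 : pvWb (pvPairs (pvDict friends) gifts)
                (pvR (pvPairs (pvDict friends) gifts)) i j = true
            · have h2 := pvWb_asymm _ _ _ _ h1
              rw [if_pos h1, h2]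
              simp [List.count_singleton, hik]
            · rw [if_neg h1]
              by_cases h2 : pvWb (pvPairs (pvDict friends) gifts)
                  (pvR (pvPairs (pvDict friends) gifts)) j i = true
              · rw [if_pos h2, if_pos h2]
                simp
              · rw [if_neg h2, if_neg h2]
                simp
          · rw [if_neg hjk]
            unfold pvWl
            split_ifs
            · simp [List.count_singleton, hik]
            · simp [List.count_singleton, hjk]
            · simp
        rw [hm, pvSum_indicator _ List.nodup_range' k]
        have hmem : k ∈ List.range' (i + 1) (friends.length - (i + 1))
            ↔ i + 1 ≤ k ∧ k < friends.length := by
          rw [List.mem_range'_1]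
          omega
        by_cases h1 : i < k
        · by_cases h2 : pvWb (pvPairs (pvDict friends) gifts)
              (pvR (pvPairs (pvDict friends) gifts)) k i = true
          · rw [if_pos (hmem.mpr ⟨by omega, hk⟩), if_pos h2, if_pos ⟨h1, h2⟩]
          · rw [if_pos (hmem.mpr ⟨by omega, hk⟩), if_neg h2, if_neg (by tauto)]
        · rw [if_neg (fun hc => h1 (by have := hmem.mp hc; omega)), if_neg (by tauto)]
    rw [hterm]
    have h3 := List.range'_append (s := 0) (m := k) (n := friends.length - k) (step := 1)
    simp only [Nat.zero_add, Nat.one_mul] at h3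
    rw [show k + (friends.length - k) = friends.length from by omega] at h3
    have h2 : k :: List.range' (k + 1) (friends.length - (k + 1))
        = List.range' k (friends.length - k) := by
      rw [show friends.length - k = (friends.length - (k + 1)) + 1 from by omega,
        List.range'_succ]
    have hsplit : List.range friends.length
        = List.range' 0 k ++ k :: List.range' (k + 1) (friends.length - (k + 1)) := by
      rw [List.range_eq_range', h2, h3]
    rw [hsplit]
    simp only [List.map_append, List.map_cons, List.sum_append, List.sum_cons,
      List.countP_append, List.countP_cons]
    have hpart1 : (List.range' 0 k).map (fun i =>
        if i = k then (List.range' (k + 1) (friends.length - (k + 1))).countP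
            (fun j => pvWb (pvPairs (pvDict friends) gifts)
              (pvR (pvPairs (pvDict friends) gifts)) k j)
        else if i < k ∧ pvWb (pvPairs (pvDict friends) gifts)
            (pvR (pvPairs (pvDict friends) gifts)) k i = true then 1 else 0)
        = (List.range' 0 k).map (fun i => if pvWb (pvPairs (pvDict friends) gifts)
            (pvR (pvPairs (pvDict friends) gifts)) k i then 1 else 0) := by
      apply List.map_congr_left
      intro i hi
      have hi' := List.mem_range'_1.mp hi
      rw [if_neg (by omega)]
      by_cases hw : pvWb (pvPairs (pvDict friends) gifts)
          (pvR (pvPairs (pvDict friends) gifts)) k i = true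
      · rw [if_pos ⟨by omega, hw⟩, if_pos hw]
      · rw [if_neg (by tauto), if_neg hw]
    have hpart3 : (List.range' (k + 1) (friends.length - (k + 1))).map (fun i =>
        if i = k then (List.range' (k + 1) (friends.length - (k + 1))).countP
            (fun j => pvWb (pvPairs (pvDict friends) gifts)
              (pvR (pvPairs (pvDict friends) gifts)) k j)
        else if i < k ∧ pvWb (pvPairs (pvDict friends) gifts)
            (pvR (pvPairs (pvDict friends) gifts)) k i = true then 1 else 0)
        = (List.range' (k + 1) (friends.length - (k + 1))).map (fun _ => 0) := by
      apply List.map_congr_left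
      intro i hi
      have hi' := List.mem_range'_1.mp hi
      rw [if_neg (by omega), if_neg (fun hc => by have := hc.1; omega)]
    rw [hpart1, hpart3, pvSum_ite_nat]
    have hz : ((List.range' (k + 1) (friends.length - (k + 1))).map
        (fun _ => (0 : Nat))).sum = 0 := by
      simp
    rw [hz, pvWb_irrefl]
    simp
  -- final assembly
  rw [pvSolutionA_eq, pvSolutionB_eq]
  have hfinal : pvGetA friends gifts = (List.range friends.length).map
      (fun k => ((pvWinnersB friends gifts).count k : Int)) := by
    rw [hGetA]
    apply List.map_congr_left
    intro k hk
    rw [List.mem_range] at hk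
    rw [hcnt k hk]
  rw [hfinal]
  rfl

-- ===== VERDICT (by name: the statement is the Claim_ definition above) =====
theorem solution_spec : Claim_equal_solution := by
  intro friends gifts _ hpre
  show solution friends gifts = solution_alt friends gifts
  exact pvMain friends gifts hpre.2
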